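-- pv_equiv track=rewrite | github.com/AiidaMP/DNAzyme-single-molecule | GetEventsFunctions_withAA.py | augment_event
-- ===== SOURCE A (Python) =====
-- def augment_event(donor_e, acceptor_e, alexAA_e):
--     """
--     Given changes in donor and acceptor that define on state, augments the
--     valid state changes to account for possible noise or off-by-two frames.
--
--     :param donor_e: State changes for donor
--     :param acceptor_e: State changes for acceptor
--     :return: Tuple with List of augmented changes for donor and acceptor
--     """
--     d_s = [[donor_e[0]]]
--     a_s = [[acceptor_e[0]]]
--     x_s = [[alexAA_e[0]]]
--
--     # Until we reach the event length.
--     for i in range(1, len(donor_e)):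
--         new_as = []
--         new_ds = []
--         new_xs = []
--
--         # For each of the already accounted for states, creates.
--         for d, a, x in zip(d_s, a_s, x_s):
--             # Repeat acceptor
--             new_as.append(a + [acceptor_e[i], acceptor_e[i]])
--             new_ds.append(d + [d[-1], donor_e[i]])
--             new_xs.append(x + [x[-1], alexAA_e[i]])
--
--             # Repeat acceptor x2
--             new_as.append(a + [acceptor_e[i], acceptor_e[i], acceptor_e[i]])
--             new_ds.append(d + [d[-1], d[-1], donor_e[i]])
--             new_xs.append(x + [x[-1], x[-1], alexAA_e[i]])
--
--             # Repeat donor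
--             new_as.append(a + [a[-1], acceptor_e[i]])
--             new_ds.append(d + [donor_e[i], donor_e[i]])
--             new_xs.append(x + [x[-1], alexAA_e[i]])
--
--             # Repeat donor x2
--             new_as.append(a + [a[-1], a[-1], acceptor_e[i]])
--             new_ds.append(d + [donor_e[i], donor_e[i], donor_e[i]])
--             new_xs.append(x + [x[-1], x[-1], alexAA_e[i]])
--
--             # Repeat Ax
--             new_as.append(a + [a[-1], acceptor_e[i]])
--             new_ds.append(d + [d[-1], donor_e[i]])
--             new_xs.append(x + [alexAA_e[i], alexAA_e[i]])
--
--             # Repeat Ax x2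
--             new_as.append(a + [a[-1], a[-1], acceptor_e[i]])
--             new_ds.append(d + [d[-1], d[-1], donor_e[i]])
--             new_xs.append(x + [alexAA_e[i], alexAA_e[i], alexAA_e[i]])
--
--             # Same
--             new_as.append(a + [acceptor_e[i]])
--             new_ds.append(d + [donor_e[i]])
--             new_xs.append(x + [alexAA_e[i]])
--
--         d_s = new_ds
--         a_s = new_as
--         x_s = new_xs
--
--     d_s = tuple([tuple(x) for x in d_s])
--     a_s = tuple([tuple(x) for x in a_s])
--     x_s = tuple([tuple(x) for x in x_s])
--     return d_s, a_s, x_s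
-- ===== SOURCE B (Python) =====
-- def augment_event(donor_e, acceptor_e, alexAA_e):
--     """Enumerate the same augmented state sequences by decoding each variant
--     index as a base-7 choice string (most-significant digit = earliest step),
--     instead of growing a frontier of prefixes."""
--     n = len(donor_e)
--     steps = n - 1
--     triples = []
--     for code in range(7 ** steps):
--         d = [donor_e[0]]
--         a = [acceptor_e[0]]
--         x = [alexAA_e[0]]
--         for i in range(1, n):
--             c = (code // 7 ** (steps - i)) % 7
--             D, A, X = donor_e[i], acceptor_e[i], alexAA_e[i]
--             dl, al, xl = d[-1], a[-1], x[-1]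
--             if c == 0:
--                 d = d + [dl, D]; a = a + [A, A]; x = x + [xl, X]
--             elif c == 1:
--                 d = d + [dl, dl, D]; a = a + [A, A, A]; x = x + [xl, xl, X]
--             elif c == 2:
--                 d = d + [D, D]; a = a + [al, A]; x = x + [xl, X]
--             elif c == 3:
--                 d = d + [D, D, D]; a = a + [al, al, A]; x = x + [xl, xl, X]
--             elif c == 4:
--                 d = d + [dl, D]; a = a + [al, A]; x = x + [X, X]
--             elif c == 5:
--                 d = d + [dl, dl, D]; a = a + [al, al, A]; x = x + [X, X, X]
--             else:
--                 d = d + [D]; a = a + [A]; x = x + [X]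
--         triples.append((d, a, x))
--     d_s = tuple(tuple(t[0]) for t in triples)
--     a_s = tuple(tuple(t[1]) for t in triples)
--     x_s = tuple(tuple(t[2]) for t in triples)
--     return d_s, a_s, x_s
-- ===== Notes on version B (the rewrite author's own statement) =====
-- stated objective: alternative
-- what changed: Replaces the growing frontier of prefix triples with a direct enumeration of variant indices 0..7^(n-1)-1, decoding each index as a base-7 string of extension-rule choices and replaying it from the initial triple; no intermediate generations are materialized.
import Mathlib
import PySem

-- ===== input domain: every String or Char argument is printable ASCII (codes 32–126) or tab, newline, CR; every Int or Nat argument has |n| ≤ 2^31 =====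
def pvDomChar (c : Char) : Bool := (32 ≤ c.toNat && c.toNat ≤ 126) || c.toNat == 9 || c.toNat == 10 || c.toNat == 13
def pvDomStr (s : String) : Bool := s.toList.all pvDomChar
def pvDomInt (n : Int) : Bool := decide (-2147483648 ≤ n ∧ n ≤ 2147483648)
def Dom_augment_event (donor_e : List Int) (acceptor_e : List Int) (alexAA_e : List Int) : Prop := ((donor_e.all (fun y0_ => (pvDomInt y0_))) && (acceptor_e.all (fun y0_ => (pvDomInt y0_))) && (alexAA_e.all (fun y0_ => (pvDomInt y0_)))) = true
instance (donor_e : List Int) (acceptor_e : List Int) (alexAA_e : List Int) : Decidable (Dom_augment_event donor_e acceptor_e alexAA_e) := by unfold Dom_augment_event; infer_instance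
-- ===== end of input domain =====

-- B replaces A's growing frontier of prefixes by enumerating variant codes 0..7^(n-1)-1
-- and replaying each code's base-7 digits as extension-rule choices (alternative decomposition).

-- ===== PORT A =====
-- literal transliteration of A: frontier lists d_s/a_s/x_s, each step expands every
-- zipped (d,a,x) into the 7 augmented successors, appended in A's branch order.
def augment_event (donor_e : List Int) (acceptor_e : List Int) (alexAA_e : List Int) : List (List Int) × List (List Int) × List (List Int) :=
  let d_s : List (List Int) := [[PySem.List.pyGetD donor_e 0 0]]
  let a_s : List (List Int) := [[PySem.List.pyGetD acceptor_e 0 0]]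
  let x_s : List (List Int) := [[PySem.List.pyGetD alexAA_e 0 0]]
  let res := (PySem.List.pyRange 1 (donor_e.length : Int) 1).foldl
    (fun (st : List (List Int) × List (List Int) × List (List Int)) i =>
      let di := PySem.List.pyGetD donor_e i 0
      let ai := PySem.List.pyGetD acceptor_e i 0
      let xi := PySem.List.pyGetD alexAA_e i 0
      ((st.1.zip st.2.1).zip st.2.2).foldl
        (fun (acc : List (List Int) × List (List Int) × List (List Int)) dax =>
          let d := dax.1.1
          let a := dax.1.2
          let x := dax.2
          let dl := PySem.List.pyGetD d (-1) 0
          let al := PySem.List.pyGetD a (-1) 0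
          let xl := PySem.List.pyGetD x (-1) 0
          (acc.1 ++ [d ++ [dl, di], d ++ [dl, dl, di], d ++ [di, di],
                     d ++ [di, di, di], d ++ [dl, di], d ++ [dl, dl, di], d ++ [di]],
           acc.2.1 ++ [a ++ [ai, ai], a ++ [ai, ai, ai], a ++ [al, ai],
                       a ++ [al, al, ai], a ++ [al, ai], a ++ [al, al, ai], a ++ [ai]],
           acc.2.2 ++ [x ++ [xl, xi], x ++ [xl, xl, xi], x ++ [xl, xi],
                       x ++ [xl, xl, xi], x ++ [xi, xi], x ++ [xi, xi, xi], x ++ [xi]]))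
        ([], [], []))
    (d_s, a_s, x_s)
  res

-- ===== PORT B =====
-- the 7 extension rules keyed by the base-7 digit c (same order as A's branches)
def bChoose (di ai xi : Int) (c : Int) (d a x : List Int) : List Int × List Int × List Int :=
  let dl := PySem.List.pyGetD d (-1) 0
  let al := PySem.List.pyGetD a (-1) 0
  let xl := PySem.List.pyGetD x (-1) 0
  if c = 0 then (d ++ [dl, di], a ++ [ai, ai], x ++ [xl, xi])
  else if c = 1 then (d ++ [dl, dl, di], a ++ [ai, ai, ai], x ++ [xl, xl, xi])
  else if c = 2 then (d ++ [di, di], a ++ [al, ai], x ++ [xl, xi])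
  else if c = 3 then (d ++ [di, di, di], a ++ [al, al, ai], x ++ [xl, xl, xi])
  else if c = 4 then (d ++ [dl, di], a ++ [al, ai], x ++ [xi, xi])
  else if c = 5 then (d ++ [dl, dl, di], a ++ [al, al, ai], x ++ [xi, xi, xi])
  else (d ++ [di], a ++ [ai], x ++ [xi])

-- transliteration of Source B: for each code in range(7^(n-1)) replay its base-7 digits
-- (exponent steps - i is ≥ 0 for every i the loop visits, so .toNat is exact there).
def augment_event_alt (donor_e : List Int) (acceptor_e : List Int) (alexAA_e : List Int) : List (List Int) × List (List Int) × List (List Int) :=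
  let n := donor_e.length
  let steps := n - 1
  let triples : List (List Int × List Int × List Int) :=
    (List.range (7 ^ steps)).map (fun (code : Nat) =>
      (PySem.List.pyRange 1 (n : Int) 1).foldl
        (fun (t : List Int × List Int × List Int) i =>
          let c := PySem.Int.mod (PySem.Int.floordiv (code : Int) ((7 : Int) ^ (((steps : Int) - i).toNat))) 7
          bChoose (PySem.List.pyGetD donor_e i 0) (PySem.List.pyGetD acceptor_e i 0)
                  (PySem.List.pyGetD alexAA_e i 0) c t.1 t.2.1 t.2.2)
        ([PySem.List.pyGetD donor_e 0 0], [PySem.List.pyGetD acceptor_e 0 0], [PySem.List.pyGetD alexAA_e 0 0]))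
  (triples.map (·.1), triples.map (·.2.1), triples.map (·.2.2))

-- ===== PRECONDITION & SPEC =====
-- Pre_: exactly the inputs on which Python A returns (otherwise it raises IndexError:
-- donor_e must be nonempty and acceptor_e/alexAA_e at least as long as donor_e).
def Pre_augment_event (donor_e : List Int) (acceptor_e : List Int) (alexAA_e : List Int) : Prop :=
  donor_e ≠ [] ∧ donor_e.length ≤ acceptor_e.length ∧ donor_e.length ≤ alexAA_e.length
instance (donor_e : List Int) (acceptor_e : List Int) (alexAA_e : List Int) : Decidable (Pre_augment_event donor_e acceptor_e alexAA_e) := by unfold Pre_augment_event; infer_instance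

def pvWitness_augment_event : List Int × List Int × List Int := ([1, 2], [3, 4], [5, 6])

def Spec_augment_event (donor_e : List Int) (acceptor_e : List Int) (alexAA_e : List Int) (out : List (List Int) × List (List Int) × List (List Int)) : Prop := out = augment_event_alt donor_e acceptor_e alexAA_e
instance (donor_e : List Int) (acceptor_e : List Int) (alexAA_e : List Int) (out : List (List Int) × List (List Int) × List (List Int)) : Decidable (Spec_augment_event donor_e acceptor_e alexAA_e out) := by unfold Spec_augment_event; infer_instance

-- ===== CLAIM (what is proved, stated in full; the proofs are below) =====
def Claim_equal_augment_event : Prop := ∀ (donor_e : List Int) (acceptor_e : List Int) (alexAA_e : List Int), Dom_augment_event donor_e acceptor_e alexAA_e → Pre_augment_event donor_e acceptor_e alexAA_e → Spec_augment_event donor_e acceptor_e alexAA_e (augment_event donor_e acceptor_e alexAA_e)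

-- ===== LEMMAS AND PROOFS =====

-- the per-position values both ports read
def fVal (d_e a_e x_e : List Int) (j : Int) : Int × Int × Int :=
  (PySem.List.pyGetD d_e j 0, PySem.List.pyGetD a_e j 0, PySem.List.pyGetD x_e j 0)

-- the 7 successors of one state, in A's branch order = B's digit order
def oneStep (v : Int × Int × Int) (t : List Int × List Int × List Int) : List (List Int × List Int × List Int) :=
  (List.range 7).map (fun (c : Nat) => bChoose v.1 v.2.1 v.2.2 (c : Int) t.1 t.2.1 t.2.2)

-- all final states reachable from t by choosing one rule per element of vals
def expandAll : List (Int × Int × Int) → (List Int × List Int × List Int) → List (List Int × List Int × List Int)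
  | [], t => [t]
  | v :: rest, t => (oneStep v t).flatMap (expandAll rest)

-- replay the base-7 digits of code (most significant first) over vals
def replayDigits : List (Int × Int × Int) → Nat → (List Int × List Int × List Int) → (List Int × List Int × List Int)
  | [], _, t => t
  | v :: rest, code, t =>
      replayDigits rest (code % 7 ^ rest.length)
        (bChoose v.1 v.2.1 v.2.2 ((code / 7 ^ rest.length % 7 : Nat) : Int) t.1 t.2.1 t.2.2)

-- A's inner loop body (definitionally the lambda in the port of A)
def aInner (di ai xi : Int) (acc : List (List Int) × List (List Int) × List (List Int))
    (dax : (List Int × List Int) × List Int) : List (List Int) × List (List Int) × List (List Int) :=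
  let d := dax.1.1
  let a := dax.1.2
  let x := dax.2
  let dl := PySem.List.pyGetD d (-1) 0
  let al := PySem.List.pyGetD a (-1) 0
  let xl := PySem.List.pyGetD x (-1) 0
  (acc.1 ++ [d ++ [dl, di], d ++ [dl, dl, di], d ++ [di, di],
             d ++ [di, di, di], d ++ [dl, di], d ++ [dl, dl, di], d ++ [di]],
   acc.2.1 ++ [a ++ [ai, ai], a ++ [ai, ai, ai], a ++ [al, ai],
               a ++ [al, al, ai], a ++ [al, ai], a ++ [al, al, ai], a ++ [ai]],
   acc.2.2 ++ [x ++ [xl, xi], x ++ [xl, xl, xi], x ++ [xl, xi],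
               x ++ [xl, xl, xi], x ++ [xi, xi], x ++ [xi, xi, xi], x ++ [xi]])

-- A's outer loop body (definitionally the lambda in the port of A)
def aBody (d_e a_e x_e : List Int) (st : List (List Int) × List (List Int) × List (List Int))
    (i : Int) : List (List Int) × List (List Int) × List (List Int) :=
  ((st.1.zip st.2.1).zip st.2.2).foldl
    (aInner (PySem.List.pyGetD d_e i 0) (PySem.List.pyGetD a_e i 0) (PySem.List.pyGetD x_e i 0))
    ([], [], [])

-- B's inner loop body (definitionally the lambda in the port of B)
def bBody (d_e a_e x_e : List Int) (code : Nat) (t : List Int × List Int × List Int)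
    (i : Int) : List Int × List Int × List Int :=
  bChoose (PySem.List.pyGetD d_e i 0) (PySem.List.pyGetD a_e i 0) (PySem.List.pyGetD x_e i 0)
    (PySem.Int.mod (PySem.Int.floordiv (code : Int)
      ((7 : Int) ^ ((((d_e.length - 1 : Nat) : Int)) - i).toNat)) 7) t.1 t.2.1 t.2.2

theorem foldl_flatMap (vals : List (Int × Int × Int)) (sts : List (List Int × List Int × List Int)) :
    vals.foldl (fun ss v => ss.flatMap (oneStep v)) sts
      = sts.flatMap (fun t => expandAll vals t) := by
  induction vals generalizing sts with
  | nil => simp [expandAll]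
  | cons v rest ih =>
      rw [List.foldl_cons, ih, List.flatMap_assoc]
      simp [expandAll]

theorem range_mul_flatMap (q m : Nat) :
    List.range (q * m) = (List.range q).flatMap (fun i => (List.range m).map (fun r => i * m + r)) := by
  induction q with
  | zero => simp
  | succ q ih =>
      rw [Nat.succ_mul, List.range_add, ih, List.range_succ]
      simp [List.flatMap_append]

-- B's remaining digits ignore multiples of 7^(number of remaining steps)
theorem replay_mod (vals : List (Int × Int × Int)) (code : Nat) (t : List Int × List Int × List Int) :
    replayDigits vals (code % 7 ^ vals.length) t = replayDigits vals code t := by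
  cases vals with
  | nil => rfl
  | cons v rest =>
      simp only [replayDigits, List.length_cons]
      rw [show (7 : Nat) ^ (rest.length + 1) = 7 ^ rest.length * 7 from pow_succ 7 rest.length,
        Nat.mod_mul_right_div_self, Nat.mod_mod_of_dvd code ⟨7, rfl⟩,
        Nat.mod_mod_of_dvd (code / 7 ^ rest.length) (dvd_refl 7)]

theorem prodLemma (vals : List (Int × Int × Int)) (t : List Int × List Int × List Int) :
    (List.range (7 ^ vals.length)).map (fun code => replayDigits vals code t) = expandAll vals t := by
  induction vals generalizing t with
  | nil => simp [replayDigits, expandAll]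
  | cons v rest ih =>
      have hm : 0 < 7 ^ rest.length := Nat.pow_pos (by norm_num)
      rw [List.length_cons, pow_succ, mul_comm, range_mul_flatMap 7 (7 ^ rest.length),
        List.map_flatMap]
      have hexp : expandAll (v :: rest) t
          = (List.range 7).flatMap
              (fun (c : Nat) => expandAll rest (bChoose v.1 v.2.1 v.2.2 (c : Int) t.1 t.2.1 t.2.2)) := by
        rw [expandAll, oneStep,
          List.flatMap_map (f := fun c : Nat => bChoose v.1 v.2.1 v.2.2 (c : Int) t.1 t.2.1 t.2.2)
            (g := expandAll rest)]
      rw [hexp]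
      refine List.flatMap_congr ?_
      intro q hq
      rw [List.map_map, ← ih (bChoose v.1 v.2.1 v.2.2 ((q : Nat) : Int) t.1 t.2.1 t.2.2)]
      refine List.map_congr_left ?_
      intro r hr
      have hq7 : q < 7 := List.mem_range.mp hq
      have hr' : r < 7 ^ rest.length := List.mem_range.mp hr
      have hdiv : (q * 7 ^ rest.length + r) / 7 ^ rest.length = q := by
        rw [mul_comm, Nat.mul_add_div hm, Nat.div_eq_of_lt hr', Nat.add_zero]
      have hmod : (q * 7 ^ rest.length + r) % 7 ^ rest.length = r := by
        rw [mul_comm, Nat.mul_add_mod, Nat.mod_eq_of_lt hr']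
      simp only [Function.comp, replayDigits, hdiv, hmod, Nat.mod_eq_of_lt hq7]

-- one step of A's frontier expansion, expressed through oneStep
theorem stepA (di ai xi : Int) (sts : List (List Int × List Int × List Int)) :
    ∀ (accd acca accx : List (List Int)),
    (((sts.map (·.1)).zip (sts.map (·.2.1))).zip (sts.map (·.2.2))).foldl
        (aInner di ai xi) (accd, acca, accx)
      = (accd ++ (sts.flatMap (oneStep (di, ai, xi))).map (·.1),
         acca ++ (sts.flatMap (oneStep (di, ai, xi))).map (·.2.1),
         accx ++ (sts.flatMap (oneStep (di, ai, xi))).map (·.2.2)) := by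
  induction sts with
  | nil => intro accd acca accx; simp
  | cons s rest ih =>
      intro accd acca accx
      simp only [List.map_cons, List.zip_cons_cons, List.foldl_cons, aInner]
      rw [ih]
      simp [oneStep, bChoose, List.range_succ, List.append_assoc]

theorem outerA (d_e a_e x_e : List Int) (L : List Int) :
    ∀ (sts : List (List Int × List Int × List Int)),
    L.foldl (aBody d_e a_e x_e) (sts.map (·.1), sts.map (·.2.1), sts.map (·.2.2))
      = ((L.foldl (fun ss i => ss.flatMap (oneStep (fVal d_e a_e x_e i))) sts).map (·.1),
         (L.foldl (fun ss i => ss.flatMap (oneStep (fVal d_e a_e x_e i))) sts).map (·.2.1),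
         (L.foldl (fun ss i => ss.flatMap (oneStep (fVal d_e a_e x_e i))) sts).map (·.2.2)) := by
  induction L with
  | nil => intro sts; rfl
  | cons i L ih =>
      intro sts
      simp only [List.foldl_cons]
      have key : aBody d_e a_e x_e (sts.map (·.1), sts.map (·.2.1), sts.map (·.2.2)) i
          = ((sts.flatMap (oneStep (fVal d_e a_e x_e i))).map (·.1),
             (sts.flatMap (oneStep (fVal d_e a_e x_e i))).map (·.2.1),
             (sts.flatMap (oneStep (fVal d_e a_e x_e i))).map (·.2.2)) := by
        simp only [aBody, fVal]
        rw [stepA]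
        simp
      rw [key, ih]

theorem foldB (d_e a_e x_e : List Int) (code : Nat) :
    ∀ (k : Nat) (i : Int), 1 ≤ i → ((d_e.length : Int) - i).toNat = k →
    ∀ (t : List Int × List Int × List Int),
    (PySem.List.pyRange i (d_e.length : Int) 1).foldl (bBody d_e a_e x_e code) t
      = replayDigits ((PySem.List.pyRange i (d_e.length : Int) 1).map (fVal d_e a_e x_e)) code t := by
  intro k
  induction k with
  | zero =>
      intro i hi hk t
      rw [PySem.List.pyRange_one_eq_nil (by omega)]
      rfl
  | succ k ih =>
      intro i hi hk t
      have hlt : i < (d_e.length : Int) := by omega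
      rw [PySem.List.pyRange_one_cons hlt, List.map_cons, List.foldl_cons, replayDigits, replay_mod]
      have hlen : ((PySem.List.pyRange (i + 1) (d_e.length : Int) 1).map (fVal d_e a_e x_e)).length
          = ((((d_e.length - 1 : Nat) : Int)) - i).toNat := by
        rw [List.length_map, PySem.List.length_pyRange_one]
        omega
      rw [hlen]
      have hdig : PySem.Int.mod (PySem.Int.floordiv (code : Int)
            ((7 : Int) ^ ((((d_e.length - 1 : Nat) : Int)) - i).toNat)) 7
          = ((code / 7 ^ ((((d_e.length - 1 : Nat) : Int)) - i).toNat % 7 : Nat) : Int) := by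
        have h7 : ((7 : Int) ^ ((((d_e.length - 1 : Nat) : Int)) - i).toNat)
            = ((7 ^ ((((d_e.length - 1 : Nat) : Int)) - i).toNat : Nat) : Int) := by push_cast; ring
        rw [h7, PySem.Int.floordiv_natCast, show (7 : Int) = ((7 : Nat) : Int) from rfl,
          PySem.Int.mod_natCast]
      simp only [bBody, fVal, hdig]
      exact ih (i + 1) (by omega) (by omega) _

-- both ports compute the projections of expandAll over the same value list
theorem portA_eq (d_e a_e x_e : List Int) :
    augment_event d_e a_e x_e =
      ((expandAll ((PySem.List.pyRange 1 (d_e.length : Int) 1).map (fVal d_e a_e x_e))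
          ([PySem.List.pyGetD d_e 0 0], [PySem.List.pyGetD a_e 0 0], [PySem.List.pyGetD x_e 0 0])).map (·.1),
       (expandAll ((PySem.List.pyRange 1 (d_e.length : Int) 1).map (fVal d_e a_e x_e))
          ([PySem.List.pyGetD d_e 0 0], [PySem.List.pyGetD a_e 0 0], [PySem.List.pyGetD x_e 0 0])).map (·.2.1),
       (expandAll ((PySem.List.pyRange 1 (d_e.length : Int) 1).map (fVal d_e a_e x_e))
          ([PySem.List.pyGetD d_e 0 0], [PySem.List.pyGetD a_e 0 0], [PySem.List.pyGetD x_e 0 0])).map (·.2.2)) := by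
  have h0 : augment_event d_e a_e x_e
      = (PySem.List.pyRange 1 (d_e.length : Int) 1).foldl (aBody d_e a_e x_e)
          (([([PySem.List.pyGetD d_e 0 0], [PySem.List.pyGetD a_e 0 0], [PySem.List.pyGetD x_e 0 0])] :
              List (List Int × List Int × List Int)).map (·.1),
           ([([PySem.List.pyGetD d_e 0 0], [PySem.List.pyGetD a_e 0 0], [PySem.List.pyGetD x_e 0 0])] :
              List (List Int × List Int × List Int)).map (·.2.1),
           ([([PySem.List.pyGetD d_e 0 0], [PySem.List.pyGetD a_e 0 0], [PySem.List.pyGetD x_e 0 0])] :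
              List (List Int × List Int × List Int)).map (·.2.2)) := rfl
  rw [h0, outerA]
  have h1 : (PySem.List.pyRange 1 (d_e.length : Int) 1).foldl
        (fun ss i => ss.flatMap (oneStep (fVal d_e a_e x_e i)))
        [([PySem.List.pyGetD d_e 0 0], [PySem.List.pyGetD a_e 0 0], [PySem.List.pyGetD x_e 0 0])]
      = ((PySem.List.pyRange 1 (d_e.length : Int) 1).map (fVal d_e a_e x_e)).foldl
        (fun ss v => ss.flatMap (oneStep v))
        [([PySem.List.pyGetD d_e 0 0], [PySem.List.pyGetD a_e 0 0], [PySem.List.pyGetD x_e 0 0])] := by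
    rw [List.foldl_map]
  rw [h1, foldl_flatMap]
  simp

theorem portB_eq (d_e a_e x_e : List Int) :
    augment_event_alt d_e a_e x_e =
      ((expandAll ((PySem.List.pyRange 1 (d_e.length : Int) 1).map (fVal d_e a_e x_e))
          ([PySem.List.pyGetD d_e 0 0], [PySem.List.pyGetD a_e 0 0], [PySem.List.pyGetD x_e 0 0])).map (·.1),
       (expandAll ((PySem.List.pyRange 1 (d_e.length : Int) 1).map (fVal d_e a_e x_e))
          ([PySem.List.pyGetD d_e 0 0], [PySem.List.pyGetD a_e 0 0], [PySem.List.pyGetD x_e 0 0])).map (·.2.1),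
       (expandAll ((PySem.List.pyRange 1 (d_e.length : Int) 1).map (fVal d_e a_e x_e))
          ([PySem.List.pyGetD d_e 0 0], [PySem.List.pyGetD a_e 0 0], [PySem.List.pyGetD x_e 0 0])).map (·.2.2)) := by
  have h0 : augment_event_alt d_e a_e x_e
      = (((List.range (7 ^ (d_e.length - 1))).map (fun code =>
            (PySem.List.pyRange 1 (d_e.length : Int) 1).foldl (bBody d_e a_e x_e code)
              ([PySem.List.pyGetD d_e 0 0], [PySem.List.pyGetD a_e 0 0], [PySem.List.pyGetD x_e 0 0]))).map (·.1),
         ((List.range (7 ^ (d_e.length - 1))).map (fun code =>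
            (PySem.List.pyRange 1 (d_e.length : Int) 1).foldl (bBody d_e a_e x_e code)
              ([PySem.List.pyGetD d_e 0 0], [PySem.List.pyGetD a_e 0 0], [PySem.List.pyGetD x_e 0 0]))).map (·.2.1),
         ((List.range (7 ^ (d_e.length - 1))).map (fun code =>
            (PySem.List.pyRange 1 (d_e.length : Int) 1).foldl (bBody d_e a_e x_e code)
              ([PySem.List.pyGetD d_e 0 0], [PySem.List.pyGetD a_e 0 0], [PySem.List.pyGetD x_e 0 0]))).map (·.2.2)) := by
    unfold augment_event_alt bBody
    rfl
  have hlen : ((PySem.List.pyRange 1 (d_e.length : Int) 1).map (fVal d_e a_e x_e)).length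
      = d_e.length - 1 := by
    rw [List.length_map, PySem.List.length_pyRange_one]
    omega
  have htr : (List.range (7 ^ (d_e.length - 1))).map (fun code =>
        (PySem.List.pyRange 1 (d_e.length : Int) 1).foldl (bBody d_e a_e x_e code)
          ([PySem.List.pyGetD d_e 0 0], [PySem.List.pyGetD a_e 0 0], [PySem.List.pyGetD x_e 0 0]))
      = expandAll ((PySem.List.pyRange 1 (d_e.length : Int) 1).map (fVal d_e a_e x_e))
          ([PySem.List.pyGetD d_e 0 0], [PySem.List.pyGetD a_e 0 0], [PySem.List.pyGetD x_e 0 0]) := by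
    rw [← prodLemma, hlen]
    refine List.map_congr_left ?_
    intro code _
    exact foldB d_e a_e x_e code (((d_e.length : Int) - 1).toNat) 1 (by omega) (by omega) _
  rw [h0, htr]

-- ===== VERDICT (by name: the statement is the Claim_ definition above) =====
theorem augment_event_spec : Claim_equal_augment_event := by
  intro donor_e acceptor_e alexAA_e _ _
  unfold Spec_augment_event
  rw [portA_eq, portB_eq]
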